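-- pv_equiv track=rewrite | github.com/ABi-dot/mahjongGame | utils/rule.py | convert_arr_to_mpsh
-- ===== SOURCE A (Python) =====
-- def convert_arr_to_mpsh(arr):
--     m, p, s, h = list(), list(), list(), list()
--     for num in arr:
--         if num < 200:
--             m.append(str(num - 100))
--         elif num < 300:
--             p.append(str(num - 200))
--         elif num < 400:
--             s.append(str(num - 300))
--         elif num < 500:
--             h.append(str((num // 10) % 10 + 4))
--         else:
--             h.append(str((num // 10) % 10))
--     res = []
--     res.append(''.join(m))
--     res.append(''.join(p))
--     res.append(''.join(s))
--     res.append(''.join(h))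
--     return res
-- ===== SOURCE B (Python) =====
-- def convert_arr_to_mpsh(arr):
--     m = ''.join(str(num - 100) for num in arr if num < 200)
--     p = ''.join(str(num - 200) for num in arr if 200 <= num < 300)
--     s = ''.join(str(num - 300) for num in arr if 300 <= num < 400)
--     h = ''.join(str((num // 10) % 10 + 4) if num < 500 else str((num // 10) % 10)
--                 for num in arr if num >= 400)
--     return [m, p, s, h]
-- ===== Notes on version B (the rewrite author's own statement) =====
-- stated objective: alternative
-- what changed: Replaces the single branching loop over four mutable accumulator lists with four independent filtered-generator passes, one per output bucket, each joined directly into its string.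
import Mathlib
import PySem

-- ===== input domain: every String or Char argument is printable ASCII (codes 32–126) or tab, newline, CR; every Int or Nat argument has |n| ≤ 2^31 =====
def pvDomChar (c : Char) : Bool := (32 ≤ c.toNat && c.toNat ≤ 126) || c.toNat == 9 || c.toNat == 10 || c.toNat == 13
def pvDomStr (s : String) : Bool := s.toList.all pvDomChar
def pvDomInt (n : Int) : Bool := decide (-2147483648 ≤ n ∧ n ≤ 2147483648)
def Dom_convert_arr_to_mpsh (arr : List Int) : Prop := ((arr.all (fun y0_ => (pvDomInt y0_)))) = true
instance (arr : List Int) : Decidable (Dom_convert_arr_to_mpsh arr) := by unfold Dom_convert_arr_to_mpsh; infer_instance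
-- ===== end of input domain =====

-- ===== PORT A =====
-- B changes the decomposition: four independent filtered passes instead of one branching loop (same cost).
-- A's loop body: appends str(...) to one of the four buckets depending on num's range.
def pvStepA (st : List String × List String × List String × List String) (num : Int) :
    List String × List String × List String × List String :=
  let (m, p, s, h) := st
  if num < 200 then (m ++ [PySem.Int.toStr (num - 100)], p, s, h)
  else if num < 300 then (m, p ++ [PySem.Int.toStr (num - 200)], s, h)
  else if num < 400 then (m, p, s ++ [PySem.Int.toStr (num - 300)], h)
  else if num < 500 then (m, p, s, h ++ [PySem.Int.toStr (PySem.Int.mod (PySem.Int.floordiv num 10) 10 + 4)])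
  else (m, p, s, h ++ [PySem.Int.toStr (PySem.Int.mod (PySem.Int.floordiv num 10) 10)])

def convert_arr_to_mpsh (arr : List Int) : List String :=
  let st := arr.foldl pvStepA ([], [], [], [])
  [PySem.Str.join "" st.1, PySem.Str.join "" st.2.1, PySem.Str.join "" st.2.2.1, PySem.Str.join "" st.2.2.2]

-- ===== PORT B =====
def pvM (arr : List Int) : List String :=
  (arr.filter (fun n => decide (n < 200))).map (fun n => PySem.Int.toStr (n - 100))
def pvP (arr : List Int) : List String :=
  (arr.filter (fun n => decide (200 ≤ n) && decide (n < 300))).map (fun n => PySem.Int.toStr (n - 200))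
def pvS (arr : List Int) : List String :=
  (arr.filter (fun n => decide (300 ≤ n) && decide (n < 400))).map (fun n => PySem.Int.toStr (n - 300))
def pvH (arr : List Int) : List String :=
  (arr.filter (fun n => decide (400 ≤ n))).map (fun n =>
    if n < 500 then PySem.Int.toStr (PySem.Int.mod (PySem.Int.floordiv n 10) 10 + 4)
    else PySem.Int.toStr (PySem.Int.mod (PySem.Int.floordiv n 10) 10))

def convert_arr_to_mpsh_alt (arr : List Int) : List String :=
  [PySem.Str.join "" (pvM arr), PySem.Str.join "" (pvP arr),
   PySem.Str.join "" (pvS arr), PySem.Str.join "" (pvH arr)]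

-- ===== PRECONDITION & SPEC =====
def Spec_convert_arr_to_mpsh (arr : List Int) (out : List String) : Prop := out = convert_arr_to_mpsh_alt arr
instance (arr : List Int) (out : List String) : Decidable (Spec_convert_arr_to_mpsh arr out) := by unfold Spec_convert_arr_to_mpsh; infer_instance

-- ===== CLAIM (what is proved, stated in full; the proofs are below) =====
def Claim_equal_convert_arr_to_mpsh : Prop := ∀ (arr : List Int), Dom_convert_arr_to_mpsh arr → Spec_convert_arr_to_mpsh arr (convert_arr_to_mpsh arr)

-- ===== LEMMAS AND PROOFS =====
-- Invariant of A's loop: the four accumulators are exactly the four filtered buckets.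
lemma foldl_pvStepA (arr : List Int) (m p s h : List String) :
    arr.foldl pvStepA (m, p, s, h) = (m ++ pvM arr, p ++ pvP arr, s ++ pvS arr, h ++ pvH arr) := by
  induction arr generalizing m p s h with
  | nil => simp [pvM, pvP, pvS, pvH]
  | cons x xs ih =>
    simp only [List.foldl_cons, pvStepA]
    split_ifs with h1 h2 h3 h4
    · simp [ih, pvM, pvP, pvS, pvH, List.append_assoc, h1,
        show ¬(200:Int) ≤ x by omega, show ¬(300:Int) ≤ x by omega, show ¬(400:Int) ≤ x by omega]
    · simp [ih, pvM, pvP, pvS, pvH, List.append_assoc, h1, h2,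
        show (200:Int) ≤ x by omega, show ¬(300:Int) ≤ x by omega, show ¬(400:Int) ≤ x by omega]
    · simp [ih, pvM, pvP, pvS, pvH, List.append_assoc, h1, h3,
        show ¬x < 300 by omega, show (300:Int) ≤ x by omega, show ¬(400:Int) ≤ x by omega]
    · simp [ih, pvM, pvP, pvS, pvH, List.append_assoc, h1, h4,
        show ¬x < 300 by omega, show ¬x < 400 by omega, show (400:Int) ≤ x by omega]
    · simp [ih, pvM, pvP, pvS, pvH, List.append_assoc, h1, h4,
        show ¬x < 300 by omega, show ¬x < 400 by omega, show (400:Int) ≤ x by omega]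

-- ===== VERDICT (by name: the statement is the Claim_ definition above) =====
theorem convert_arr_to_mpsh_spec : Claim_equal_convert_arr_to_mpsh := by
  intro arr _
  unfold Spec_convert_arr_to_mpsh convert_arr_to_mpsh convert_arr_to_mpsh_alt
  rw [foldl_pvStepA]
  simp
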